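-- pv_equiv track=rewrite | github.com/tgesli/algofun | poker/poker.py | sortPairs
-- ===== SOURCE A (Python) =====
-- def sortPairs(hr):
--     freq = {}
--     for r in hr:
--         if r in freq:
--             freq[r] += 1
--         else:
--             freq[r] = 1
--
--     l = sorted([(freq[r], r) for r in freq], reverse=True)
--
--     sr = []
--     for f, r in l:
--         for i in range(f):
--             sr.append(r)
--
--     return sr
-- ===== SOURCE B (Python) =====
-- def sortPairs(hr):
--     freq = {}
--     for r in hr:
--         freq[r] = freq.get(r, 0) + 1
--     return sorted(hr, key=lambda r: (freq[r], r), reverse=True)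
-- ===== Notes on version B (the rewrite author's own statement) =====
-- stated objective: idiomatic
-- what changed: B builds the same frequency dict but then sorts the n input elements directly with key (freq[r], r) descending, instead of sorting the k distinct (freq, rank) tuples and re-expanding each rank with a nested counting loop.
import Mathlib
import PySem

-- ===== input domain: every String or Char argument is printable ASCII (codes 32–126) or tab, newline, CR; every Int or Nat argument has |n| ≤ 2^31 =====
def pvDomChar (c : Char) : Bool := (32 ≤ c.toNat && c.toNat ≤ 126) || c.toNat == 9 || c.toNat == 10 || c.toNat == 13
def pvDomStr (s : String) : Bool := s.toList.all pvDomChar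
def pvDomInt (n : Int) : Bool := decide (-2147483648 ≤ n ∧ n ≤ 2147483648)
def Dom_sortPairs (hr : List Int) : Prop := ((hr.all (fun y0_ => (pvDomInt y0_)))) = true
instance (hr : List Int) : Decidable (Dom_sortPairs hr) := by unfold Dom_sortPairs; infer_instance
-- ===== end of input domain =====

-- B replaces A's sort-distinct-pairs-then-expand with one direct key sort of the input (idiomatic).

-- ===== PORT A =====
def sortPairs (hr : List Int) : List Int :=
  let freq : PySem.Dict Int Int :=
    hr.foldl (fun d r => if d.contains r then d.modify r 0 (· + 1) else d.insert r 1)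
      PySem.Dict.empty
  let l := PySem.List.sorted2 (freq.keys.map (fun r => (freq.getD r 0, r))) Prod.fst Prod.snd true
  l.foldl (fun sr p => (PySem.List.pyRange 0 p.1 1).foldl (fun acc _ => acc ++ [p.2]) sr) []

-- ===== PORT B =====
def sortPairs_alt (hr : List Int) : List Int :=
  let freq : PySem.Dict Int Int :=
    hr.foldl (fun d r => d.insert r (d.getD r 0 + 1)) PySem.Dict.empty
  PySem.List.sorted2 hr (fun r => freq.getD r 0) (fun r => r) true

-- ===== PRECONDITION & SPEC =====
def Spec_sortPairs (hr : List Int) (out : List Int) : Prop := out = sortPairs_alt hr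
instance (hr : List Int) (out : List Int) : Decidable (Spec_sortPairs hr out) := by unfold Spec_sortPairs; infer_instance

-- ===== CLAIM (what is proved, stated in full; the proofs are below) =====
def Claim_equal_sortPairs : Prop := ∀ (hr : List Int), Dom_sortPairs hr → Spec_sortPairs hr (sortPairs hr)

-- ===== LEMMAS AND PROOFS =====

-- A's counting branch is exactly Counter's modify step
theorem pv_stepA_eq (d : PySem.Dict Int Int) (r : Int) :
    (if d.contains r then d.modify r 0 (· + 1) else d.insert r 1) = d.modify r 0 (· + 1) := by
  split
  · rfl
  · rename_i h
    have h' : d.contains r = false := by simpa using h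
    simp [PySem.Dict.modify, PySem.Dict.insert, h', PySem.Dict.getD_of_not_contains]

theorem pv_foldA_eq_counter (hr : List Int) :
    hr.foldl (fun d r => if d.contains r then d.modify r 0 (· + 1) else d.insert r 1)
      PySem.Dict.empty = PySem.Dict.counter hr := by
  rw [PySem.Dict.counter_eq_foldl]
  congr 1
  funext d r
  exact pv_stepA_eq d r

theorem pv_expandA (l : List (Int × Int)) (init : List Int) :
    l.foldl (fun sr p => (PySem.List.pyRange 0 p.1 1).foldl (fun acc _ => acc ++ [p.2]) sr) init
      = init ++ l.flatMap (fun p => List.replicate p.1.toNat p.2) := by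
  induction l generalizing init with
  | nil => simp
  | cons p t ih =>
    simp [PySem.List.length_pyRange_one, List.flatMap_def]

-- sorted2 is sorted with a lexicographic key
theorem pv_sorted2_eq_sorted_lex {α : Type} (xs : List α) (k1 k2 : α → Int) (rev : Bool) :
    PySem.List.sorted2 xs k1 k2 rev
      = PySem.List.sorted xs (fun a => toLex (k1 a, k2 a)) rev := by
  unfold PySem.List.sorted2 PySem.List.sorted
  have h : (fun a b => decide (k1 a < k1 b) || (!decide (k1 b < k1 a) && decide (k2 a < k2 b)))
      = (fun a b : α => decide (toLex (k1 a, k2 a) < toLex (k1 b, k2 b))) := by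
    funext a b
    apply Bool.eq_iff_iff.mpr
    simp only [Bool.or_eq_true, Bool.and_eq_true, Bool.not_eq_true', decide_eq_true_eq,
      decide_eq_false_iff_not, Prod.Lex.toLex_lt_toLex]
    omega
  rw [h]

-- B's sorted2 is the direct lex-key sort by (count, rank)
theorem pv_alt_eq (hr : List Int) :
    sortPairs_alt hr
      = PySem.List.sorted hr (fun r => toLex ((hr.count r : Int), r)) true := by
  unfold sortPairs_alt
  rw [pv_sorted2_eq_sorted_lex]
  congr 1
  funext r
  simp [PySem.Dict.getD_foldl_insert_add_one]

-- A's result is the expansion of the reverse-sorted list of distinct (count, rank) pairs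
theorem pv_A_eq (hr : List Int) :
    sortPairs hr
      = (PySem.List.sorted ((PySem.Set.ofList hr).map (fun r => ((hr.count r : Int), r)))
          (fun p : Int × Int => toLex p) true).flatMap
          (fun p => List.replicate p.1.toNat p.2) := by
  unfold sortPairs
  simp only [pv_foldA_eq_counter, PySem.Dict.keys_counter, PySem.Dict.getD_counter,
    pv_sorted2_eq_sorted_lex, pv_expandA, List.nil_append]

-- the sum of per-rank counts over the distinct ranks
theorem pv_sum_ite (v : Int) (c : Int → Nat) (s : List Int) (hs : s.Nodup) :
    (s.map (fun r => if v = r then c r else 0)).sum = if v ∈ s then c v else 0 := by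
  induction s with
  | nil => simp
  | cons a t ih =>
    rcases List.nodup_cons.mp hs with ⟨ha, ht⟩
    by_cases hv : v = a
    · subst hv
      simp [ih ht, ha]
    · simp [hv, ih ht]

-- the expansion is a permutation of the input
theorem pv_perm_expand (hr : List Int) :
    ((PySem.Set.ofList hr).flatMap
        (fun r => List.replicate (hr.count r) r)).Perm hr := by
  rw [List.perm_iff_count]
  intro v
  rw [List.flatMap_def, List.count_flatten, List.map_map]
  have : ((PySem.Set.ofList hr).map
        ((fun l => List.count v l) ∘ fun r => List.replicate (hr.count r) r))
      = (PySem.Set.ofList hr).map (fun r => if v = r then hr.count v else 0) := by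
    apply List.map_congr_left
    intro r _
    simp only [Function.comp_apply, List.count_replicate, beq_iff_eq]
    by_cases h : v = r
    · subst h
      simp
    · simp [h]
      intro h'
      exact absurd h'.symm h
  rw [this, pv_sum_ite v _ _ (PySem.Set.nodup_ofList hr)]
  by_cases hv : v ∈ hr
  · simp [PySem.Set.mem_ofList, hv]
  · simp [PySem.Set.mem_ofList, hv, List.count_eq_zero_of_not_mem hv]

-- main: expanding the reverse-sorted distinct pairs = sorting the input by (count, rank) desc
theorem pv_main (hr : List Int) :
    (PySem.List.sorted ((PySem.Set.ofList hr).map (fun r => ((hr.count r : Int), r)))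
        (fun p : Int × Int => toLex p) true).flatMap
        (fun p => List.replicate p.1.toNat p.2)
      = PySem.List.sorted hr (fun r => toLex ((hr.count r : Int), r)) true := by
  set g : Int → Int × Int := fun r => ((hr.count r : Int), r) with hg
  set L : List (Int × Int) := (PySem.Set.ofList hr).map g with hL
  set M : List (Int × Int) := PySem.List.sorted L (fun p : Int × Int => toLex p) true with hM
  set f : Int × Int → List Int := fun p => List.replicate p.1.toNat p.2 with hf
  set key' : Int → Lex (Int × Int) := fun r => toLex (-(hr.count r : Int), -r) with hkey'
  have hginj : Function.Injective g := by
    intro a b h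
    exact congrArg Prod.snd h
  have hinj : Function.Injective key' := by
    intro a b h
    simp only [hkey', toLex_inj, Prod.mk.injEq] at h
    omega
  have hLnd : L.Nodup := List.Nodup.map hginj (PySem.Set.nodup_ofList hr)
  have hMperm : M.Perm L := PySem.List.sorted_perm L _ true
  have hMnd : M.Nodup := (hMperm.nodup_iff).mpr hLnd
  have hMle : M.Pairwise (fun a b => toLex b ≤ toLex a) :=
    PySem.List.sorted_pairwise_rev L (fun p : Int × Int => toLex p)
  have hstrict : M.Pairwise (fun a b => toLex b < toLex a) := by
    refine (hMle.and hMnd).imp ?_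
    rintro a b ⟨hle, hne⟩
    exact lt_of_le_of_ne hle (fun hEq => hne (toLex_inj.mp hEq).symm)
  have hmemL : ∀ p ∈ M, p.1 = (hr.count p.2 : Int) := by
    intro p hp
    have : p ∈ L := hMperm.mem_iff.mp hp
    rcases List.mem_map.mp this with ⟨r, _, rfl⟩
    rfl
  -- permutation
  have hEperm : (M.flatMap f).Perm hr := by
    have h1 : (M.flatMap f).Perm (L.flatMap f) :=
      hMperm.flatMap (fun a _ => List.Perm.refl _)
    have h2 : L.flatMap f
        = (PySem.Set.ofList hr).flatMap (fun r => List.replicate (hr.count r) r) := by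
      rw [hL, List.flatMap_map]
      simp [hf, hg]
    exact h1.trans (h2 ▸ pv_perm_expand hr)
  -- sortedness of the expansion under key'
  have hEsorted : (M.flatMap f).Pairwise (fun a b => key' a ≤ key' b) := by
    rw [List.flatMap_def, List.pairwise_flatten]
    constructor
    · intro l hl
      rcases List.mem_map.mp hl with ⟨p, _, rfl⟩
      exact List.pairwise_replicate.mpr (Or.inr le_rfl)
    · rw [List.pairwise_map]
      refine hstrict.imp_of_mem ?_
      intro p q hp hq hlt x hx y hy
      rw [List.eq_of_mem_replicate hx, List.eq_of_mem_replicate hy]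
      have h1 := hmemL p hp
      have h2 := hmemL q hq
      simp only [Prod.Lex.toLex_lt_toLex] at hlt
      simp only [hkey', Prod.Lex.toLex_le_toLex]
      rw [← h1, ← h2]
      omega
  -- sortedness of B's sort under key'
  have hBsorted : (PySem.List.sorted hr (fun r => toLex ((hr.count r : Int), r)) true).Pairwise
      (fun a b => key' a ≤ key' b) := by
    refine (PySem.List.sorted_pairwise_rev hr (fun r => toLex ((hr.count r : Int), r))).imp ?_
    intro a b h
    simp only [Prod.Lex.toLex_le_toLex] at h
    simp only [hkey', Prod.Lex.toLex_le_toLex]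
    omega
  have hperm : (M.flatMap f).Perm
      (PySem.List.sorted hr (fun r => toLex ((hr.count r : Int), r)) true) :=
    hEperm.trans (PySem.List.sorted_perm hr _ true).symm
  exact PySem.List.eq_of_perm_of_pairwise_le_of_injective key' hinj hperm hEsorted hBsorted

-- ===== VERDICT (by name: the statement is the Claim_ definition above) =====
theorem sortPairs_spec : Claim_equal_sortPairs := by
  intro hr _
  unfold Spec_sortPairs
  rw [pv_A_eq, pv_alt_eq]
  exact pv_main hr
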